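-- pv_equiv track=rewrite | github.com/tokoye/CPSC-322-Partner-Project | mysklearn/myutils.py | get_freq_1col
-- ===== SOURCE A (Python) =====
-- def get_freq_1col(col):
--     col.sort() # inplace
--     values = []
--     counts = []
--
--     for value in col:
--         if value not in values:
--             # first time we have seen this value
--             values.append(value)
--             counts.append(1)
--         else:
--             # we have seen this value before
--             counts[-1] += 1 # ok because the list is sorted
--
--     return values, counts
-- ===== SOURCE B (Python) =====
-- def get_freq_1col(col):
--     col.sort()  # inplace, same as A
--     values = []
--     counts = []
--     prev = None
--     run = 0
--     for v in col:
--         if prev is not None and v == prev: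
--             run += 1
--         else:
--             if prev is not None:
--                 values.append(prev)
--                 counts.append(run)
--             prev = v
--             run = 1
--     if prev is not None:
--         values.append(prev)
--         counts.append(run)
--     return values, counts
-- ===== Notes on version B (the rewrite author's own statement) =====
-- stated objective: faster
-- what changed: Replaces the 'value not in values' membership scan of the output list (quadratic overall) with a single pass over the sorted data that tracks the current run (prev, run) and flushes each run when the value changes.
import Mathlib
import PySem

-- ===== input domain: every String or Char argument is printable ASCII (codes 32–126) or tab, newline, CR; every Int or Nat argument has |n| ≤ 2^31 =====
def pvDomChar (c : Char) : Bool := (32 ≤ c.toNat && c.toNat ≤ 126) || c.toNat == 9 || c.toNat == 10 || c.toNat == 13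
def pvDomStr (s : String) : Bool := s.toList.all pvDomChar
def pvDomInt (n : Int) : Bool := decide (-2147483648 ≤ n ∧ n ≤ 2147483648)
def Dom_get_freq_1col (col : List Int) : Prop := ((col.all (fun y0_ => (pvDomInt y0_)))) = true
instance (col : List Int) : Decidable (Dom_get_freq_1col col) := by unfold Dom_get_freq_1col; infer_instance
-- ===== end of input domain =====

-- B replaces A's quadratic 'value not in values' scan by a single pass tracking the current run
-- (prev, run) over the sorted data; both A and B sort the argument list in place in Python, the
-- equivalence proved here is about the return value.

-- ===== PORT A =====
-- counts[-1] += 1 : increment the last element (the branch is only reached with counts nonempty)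
def incLast : List Int → List Int
  | [] => []
  | [c] => [c + 1]
  | c :: cs => c :: incLast cs

def aStep (st : List Int × List Int) (v : Int) : List Int × List Int :=
  if v ∈ st.1 then (st.1, incLast st.2) else (st.1 ++ [v], st.2 ++ [1])

def get_freq_1col (col : List Int) : List Int × List Int :=
  (PySem.List.sorted col (fun x => x) false).foldl aStep ([], [])

-- ===== PORT B =====
def bStep (st : Option Int × Int × List Int × List Int) (v : Int) :
    Option Int × Int × List Int × List Int :=
  match st with
  | (some p, run, vs, cs) =>
      if v = p then (some p, run + 1, vs, cs)
      else (some v, 1, vs ++ [p], cs ++ [run])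
  | (none, _, vs, cs) => (some v, 1, vs, cs)

-- the final flush after the loop
def bFlush : Option Int × Int × List Int × List Int → List Int × List Int
  | (some p, run, vs, cs) => (vs ++ [p], cs ++ [run])
  | (none, _, vs, cs) => (vs, cs)

def get_freq_1col_alt (col : List Int) : List Int × List Int :=
  bFlush ((PySem.List.sorted col (fun x => x) false).foldl bStep (none, 0, [], []))

-- ===== PRECONDITION & SPEC =====
def Spec_get_freq_1col (col : List Int) (out : List Int × List Int) : Prop := out = get_freq_1col_alt col
instance (col : List Int) (out : List Int × List Int) : Decidable (Spec_get_freq_1col col out) := by unfold Spec_get_freq_1col; infer_instance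

-- ===== CLAIM (what is proved, stated in full; the proofs are below) =====
def Claim_equal_get_freq_1col : Prop := ∀ (col : List Int), Dom_get_freq_1col col → Spec_get_freq_1col col (get_freq_1col col)

-- ===== LEMMAS AND PROOFS =====

theorem incLast_append (cs : List Int) (r : Int) : incLast (cs ++ [r]) = cs ++ [r + 1] := by
  induction cs with
  | nil => rfl
  | cons c cs ih =>
    cases cs with
    | nil => rfl
    | cons d t => simpa [incLast] using ih

theorem loop_eq (l : List Int) (vs cs : List Int) (p r : Int)
    (hmax : ∀ x ∈ vs ++ [p], x ≤ p)
    (hle : ∀ x ∈ vs ++ [p], ∀ y ∈ l, x ≤ y)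
    (hs : l.Pairwise (· ≤ ·)) :
    l.foldl aStep (vs ++ [p], cs ++ [r]) = bFlush (l.foldl bStep (some p, r, vs, cs)) := by
  induction l generalizing vs cs p r with
  | nil => rfl
  | cons v t ih =>
    rcases List.pairwise_cons.mp hs with ⟨hvt, ht⟩
    by_cases hv : v ∈ vs ++ [p]
    · have hvp : v = p :=
        le_antisymm (hmax v hv) (hle p (by simp) v (by simp))
      simp only [List.foldl_cons, aStep, bStep, if_pos hv, if_pos hvp, incLast_append]
      exact ih vs cs p (r + 1) hmax (fun x hx y hy => hle x hx y (List.mem_cons_of_mem _ hy)) ht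
    · have hvp : ¬ v = p := fun h => hv (by simp [h])
      simp only [List.foldl_cons, aStep, bStep, if_neg hv, if_neg hvp]
      exact ih (vs ++ [p]) (cs ++ [r]) v 1
        (by
          intro x hx
          rcases List.mem_append.mp hx with hx' | hx'
          · exact hle x hx' v (by simp)
          · simp at hx'; omega)
        (by
          intro x hx y hy
          rcases List.mem_append.mp hx with hx' | hx'
          · exact hle x hx' y (List.mem_cons_of_mem _ hy)
          · simp at hx'; subst hx'; exact hvt y hy)
        ht

-- ===== VERDICT (by name: the statement is the Claim_ definition above) =====
theorem get_freq_1col_spec : Claim_equal_get_freq_1col := by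
  intro col _
  unfold Spec_get_freq_1col get_freq_1col get_freq_1col_alt
  have hs : (PySem.List.sorted col (fun x => x) false).Pairwise (fun a b => (fun x => x) a ≤ (fun x => x) b) :=
    PySem.List.sorted_pairwise col (fun x => x)
  cases h : PySem.List.sorted col (fun x => x) false with
  | nil => rfl
  | cons v t =>
    rw [h] at hs
    rcases List.pairwise_cons.mp hs with ⟨hvt, ht⟩
    simp only [List.foldl_cons, aStep, bStep, List.not_mem_nil]
    exact loop_eq t [] [] v 1 (by simp) (by intro x hx y hy; simp at hx; subst hx; exact hvt y hy) ht
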